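-- pv_equiv track=rewrite | github.com/Duosis-Developer-Team/project-zabake | zabbix-monitoring/scripts/utils/host_metadata.py | extract_standard_host_tags
-- ===== SOURCE A (Python) =====
-- from typing import Any, Dict, List, Tuple
--
-- STANDARD_TAG_NAMES: Tuple[str, ...] = ("Location", "Contact", "Tenant")
--
-- def extract_standard_host_tags(host_tags: List[Dict[str, Any]]) -> Dict[str, str]:
--     """
--     Read Location, Contact, Tenant from Zabbix host tags.
--     Tag name matching is case-insensitive; output keys are lowercase.
--     """
--     out = {"location": "", "contact": "", "tenant": ""}
--     if not host_tags:
--         return out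
--
--     wanted = {n.lower(): n for n in STANDARD_TAG_NAMES}
--     for entry in host_tags:
--         tag_name = (entry.get("tag") or "").strip()
--         if not tag_name:
--             continue
--         key = wanted.get(tag_name.lower())
--         if key:
--             out[key.lower()] = (entry.get("value") or "").strip()
--     return out
-- ===== SOURCE B (Python) =====
-- from typing import Any, Dict, List, Tuple
--
-- STANDARD_TAG_NAMES: Tuple[str, ...] = ("Location", "Contact", "Tenant")
--
-- def extract_standard_host_tags(host_tags: List[Dict[str, Any]]) -> Dict[str, str]:
--     """
--     Two-phase: normalize ALL tags into an index (last-wins via dict overwrite),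
--     then select the standard names from the index.
--     """
--     normalized = {}
--     for entry in (host_tags or []):
--         name = (entry.get("tag") or "").strip()
--         if name:
--             normalized[name.lower()] = (entry.get("value") or "").strip()
--     return {n.lower(): normalized.get(n.lower(), "") for n in STANDARD_TAG_NAMES}
-- ===== Notes on version B (the rewrite author's own statement) =====
-- stated objective: simpler
-- what changed: B replaces A's filter-during-the-loop (lookup each tag in a 'wanted' map and update a pre-seeded result dict) by a two-phase decomposition: one pass normalizes every tag into an index, then the result is built by selecting the three standard names from that index.
import Mathlib
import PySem

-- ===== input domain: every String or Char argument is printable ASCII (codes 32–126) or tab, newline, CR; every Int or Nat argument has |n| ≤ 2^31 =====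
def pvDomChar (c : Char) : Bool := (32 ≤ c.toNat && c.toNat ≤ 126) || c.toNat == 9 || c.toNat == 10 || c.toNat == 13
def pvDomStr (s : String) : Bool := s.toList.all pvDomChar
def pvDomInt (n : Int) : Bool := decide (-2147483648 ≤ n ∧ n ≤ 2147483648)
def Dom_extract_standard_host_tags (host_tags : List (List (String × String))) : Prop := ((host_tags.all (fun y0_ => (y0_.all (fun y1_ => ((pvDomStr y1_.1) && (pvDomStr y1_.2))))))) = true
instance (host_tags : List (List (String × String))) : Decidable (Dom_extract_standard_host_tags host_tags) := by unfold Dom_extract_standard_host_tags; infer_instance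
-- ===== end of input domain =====

-- B is a two-phase decomposition of A (normalize all tags into an index, then select the
-- three standard names); objective: simpler, same O(n) cost.

-- shared primitive: Python's `(entry.get(k) or "").strip()` (first-match assoc lookup;
-- `or ""` maps None to "" and is the identity on strings since "" or "" == "")
def pvField (entry : List (String × String)) (k : String) : String :=
  PySem.Str.strip ((List.lookup k entry).getD "")

-- ===== PORT A =====
def extract_standard_host_tags (host_tags : List (List (String × String))) : List (String × String) :=
  let out : PySem.Dict String String :=
    PySem.Dict.ofList [("location", ""), ("contact", ""), ("tenant", "")]
  if host_tags.isEmpty then out.items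
  else
    let wanted : PySem.Dict String String :=
      ["Location", "Contact", "Tenant"].foldl
        (fun d n => d.insert (PySem.Str.lower n) n) PySem.Dict.empty
    (host_tags.foldl (fun out entry =>
      let tag_name := pvField entry "tag"
      if tag_name = "" then out
      else
        match wanted.get? (PySem.Str.lower tag_name) with
        | some key =>
            if key ≠ "" then out.insert (PySem.Str.lower key) (pvField entry "value") else out
        | none => out) out).items

-- ===== PORT B =====
def extract_standard_host_tags_alt (host_tags : List (List (String × String))) : List (String × String) :=
  let normalized : PySem.Dict String String :=
    host_tags.foldl (fun d entry =>
      let name := pvField entry "tag"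
      if name = "" then d
      else d.insert (PySem.Str.lower name) (pvField entry "value")) PySem.Dict.empty
  ["Location", "Contact", "Tenant"].map
    (fun n => (PySem.Str.lower n, normalized.getD (PySem.Str.lower n) ""))

-- ===== PRECONDITION & SPEC =====
def Spec_extract_standard_host_tags (host_tags : List (List (String × String))) (out : List (String × String)) : Prop := out = extract_standard_host_tags_alt host_tags
instance (host_tags : List (List (String × String))) (out : List (String × String)) : Decidable (Spec_extract_standard_host_tags host_tags out) := by unfold Spec_extract_standard_host_tags; infer_instance

-- ===== CLAIM (what is proved, stated in full; the proofs are below) =====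
def Claim_equal_extract_standard_host_tags : Prop := ∀ (host_tags : List (List (String × String))), Dom_extract_standard_host_tags host_tags → Spec_extract_standard_host_tags host_tags (extract_standard_host_tags host_tags)

-- ===== LEMMAS AND PROOFS =====

-- the three standard slots B fills from an index d
def pvTarget (d : PySem.Dict String String) : List (String × String) :=
  [("location", d.getD "location" ""), ("contact", d.getD "contact" ""), ("tenant", d.getD "tenant" "")]

def pvWanted : PySem.Dict String String :=
  PySem.Dict.mk [("location", "Location"), ("contact", "Contact"), ("tenant", "Tenant")]

def pvStepA (out : PySem.Dict String String) (entry : List (String × String)) : PySem.Dict String String :=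
  let tag_name := pvField entry "tag"
  if tag_name = "" then out
  else
    match pvWanted.get? (PySem.Str.lower tag_name) with
    | some key =>
        if key ≠ "" then out.insert (PySem.Str.lower key) (pvField entry "value") else out
    | none => out

def pvStepB (d : PySem.Dict String String) (entry : List (String × String)) : PySem.Dict String String :=
  let name := pvField entry "tag"
  if name = "" then d
  else d.insert (PySem.Str.lower name) (pvField entry "value")

theorem pv_wanted_eq :
    (["Location", "Contact", "Tenant"].foldl
      (fun d n => PySem.Dict.insert d (PySem.Str.lower n) n) PySem.Dict.empty) = pvWanted := by
  decide

theorem pv_out0_eq :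
    PySem.Dict.ofList [(("location" : String), ("" : String)), ("contact", ""), ("tenant", "")]
      = PySem.Dict.mk (pvTarget PySem.Dict.empty) := by
  decide

theorem pvA_eq (l : List (List (String × String))) :
    extract_standard_host_tags l
      = if l.isEmpty then (PySem.Dict.mk (pvTarget PySem.Dict.empty)).items
        else (l.foldl pvStepA (PySem.Dict.mk (pvTarget PySem.Dict.empty))).items := by
  unfold extract_standard_host_tags
  rw [pv_wanted_eq, pv_out0_eq]
  rfl

theorem pv_lower_Location : PySem.Str.lower "Location" = "location" := by decide
theorem pv_lower_Contact : PySem.Str.lower "Contact" = "contact" := by decide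
theorem pv_lower_Tenant : PySem.Str.lower "Tenant" = "tenant" := by decide

theorem pvB_eq (l : List (List (String × String))) :
    extract_standard_host_tags_alt l = pvTarget (l.foldl pvStepB PySem.Dict.empty) := by
  unfold extract_standard_host_tags_alt
  simp only [List.map_cons, List.map_nil, pv_lower_Location, pv_lower_Contact, pv_lower_Tenant]
  rfl

theorem pv_insert_target (d : PySem.Dict String String) (k v : String)
    (hk : k = "location" ∨ k = "contact" ∨ k = "tenant") :
    (PySem.Dict.mk (pvTarget d)).insert k v = PySem.Dict.mk (pvTarget (d.insert k v)) := by
  apply PySem.Dict.ext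
  rcases hk with hk | hk | hk <;> subst hk <;>
    simp [pvTarget, PySem.Dict.items_insert, PySem.Dict.getD_insert, PySem.Dict.contains_mk]

theorem pv_target_insert_other (d : PySem.Dict String String) (k v : String)
    (h1 : k ≠ "location") (h2 : k ≠ "contact") (h3 : k ≠ "tenant") :
    pvTarget (d.insert k v) = pvTarget d := by
  simp [pvTarget, PySem.Dict.getD_insert, h1.symm, h2.symm, h3.symm]

theorem pv_wanted_get? (k : String) :
    pvWanted.get? k =
      if k = "location" then some "Location"
      else if k = "contact" then some "Contact"
      else if k = "tenant" then some "Tenant" else none := by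
  by_cases h1 : k = "location"
  · subst h1; decide
  by_cases h2 : k = "contact"
  · subst h2; decide
  by_cases h3 : k = "tenant"
  · subst h3; decide
  have n1 : (("location" : String) == k) = false := by
    rw [beq_eq_false_iff_ne]; exact fun h => h1 h.symm
  have n2 : (("contact" : String) == k) = false := by
    rw [beq_eq_false_iff_ne]; exact fun h => h2 h.symm
  have n3 : (("tenant" : String) == k) = false := by
    rw [beq_eq_false_iff_ne]; exact fun h => h3 h.symm
  rw [if_neg h1, if_neg h2, if_neg h3]
  simp [pvWanted, n1, n2, n3, PySem.Dict.get?]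

theorem pv_step (d : PySem.Dict String String) (entry : List (String × String)) :
    pvStepA (PySem.Dict.mk (pvTarget d)) entry = PySem.Dict.mk (pvTarget (pvStepB d entry)) := by
  unfold pvStepA pvStepB
  by_cases h : pvField entry "tag" = ""
  · simp [h]
  · simp only [if_neg h, pv_wanted_get?]
    by_cases h1 : PySem.Str.lower (pvField entry "tag") = "location"
    · rw [if_pos h1, h1]
      simpa [pv_lower_Location] using
        pv_insert_target d "location" (pvField entry "value") (Or.inl rfl)
    · rw [if_neg h1]
      by_cases h2 : PySem.Str.lower (pvField entry "tag") = "contact"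
      · rw [if_pos h2, h2]
        simpa [pv_lower_Contact] using
          pv_insert_target d "contact" (pvField entry "value") (Or.inr (Or.inl rfl))
      · rw [if_neg h2]
        by_cases h3 : PySem.Str.lower (pvField entry "tag") = "tenant"
        · rw [if_pos h3, h3]
          simpa [pv_lower_Tenant] using
            pv_insert_target d "tenant" (pvField entry "value") (Or.inr (Or.inr rfl))
        · rw [if_neg h3, pv_target_insert_other d _ _ h1 h2 h3]

theorem pv_fold (l : List (List (String × String))) (d : PySem.Dict String String) :
    l.foldl pvStepA (PySem.Dict.mk (pvTarget d))
      = PySem.Dict.mk (pvTarget (l.foldl pvStepB d)) := by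
  induction l generalizing d with
  | nil => rfl
  | cons e t ih =>
      rw [List.foldl_cons, List.foldl_cons, pv_step]
      exact ih _

-- ===== VERDICT (by name: the statement is the Claim_ definition above) =====
theorem extract_standard_host_tags_spec : Claim_equal_extract_standard_host_tags := by
  intro host_tags _
  unfold Spec_extract_standard_host_tags
  rw [pvA_eq, pvB_eq]
  cases host_tags with
  | nil => rfl
  | cons e t =>
      rw [List.isEmpty_cons, if_neg (by simp), pv_fold]
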